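-- pv_equiv track=rewrite | github.com/wobwob73/wardriving_analyzer69 | wardriving_analyzer_v4.4.3_playback_docked/wardriving_analyzer/backend/analysis_engine.py | _normalize_security
-- ===== SOURCE A (Python) =====
-- from typing import Dict, List, Optional
--
-- def _normalize_security(security: Optional[str]) -> str:
--     """Canonicalize security strings into a small set of categories.
--
--     Categories:
--       OPEN, OWE, WEP, WPA1, WPA2, WPA3, WPA2/WPA3, UNKNOWN
--     """
--     if not security:
--         return ''
--     s = str(security).strip()
--     if not s or s.lower() == 'nan':
--         return ''
--     up = s.upper()
--
--     # Common "open" markers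
--     if any(tok in up for tok in ['OPEN', 'NONE', 'UNSEC', 'NO ENC', 'NO_ENC', 'NOENCRYPT']):
--         # But treat OWE (enhanced open) distinctly if mentioned.
--         if 'OWE' in up:
--             return 'OWE'
--         return 'OPEN'
--
--     if 'WEP' in up:
--         return 'WEP'
--
--     # WPA3 markers
--     if any(tok in up for tok in ['WPA3', 'SAE']):
--         # If it also includes WPA2, mark mixed mode.
--         if 'WPA2' in up:
--             return 'WPA2/WPA3'
--         return 'WPA3'
--
--     # WPA2 markers
--     if 'WPA2' in up:
--         return 'WPA2'
--
--     # WPA1 / legacy WPA markers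
--     if 'WPA' in up:
--         return 'WPA1'
--
--     # OWE markers without explicit OPEN above
--     if 'OWE' in up:
--         return 'OWE'
--
--     return 'UNKNOWN'
-- ===== SOURCE B (Python) =====
-- # Single-sweep multi-pattern matcher: one pass over the string positions finds
-- # the minimum-priority token match (plus OWE/WPA2 flags) instead of A's
-- # seven separate `in` scans and interleaved branch ladder.
-- _PRIORITY = [
--     ('OPEN', 0), ('NONE', 0), ('UNSEC', 0), ('NO ENC', 0),
--     ('NO_ENC', 0), ('NOENCRYPT', 0),
--     ('WEP', 1), ('WPA3', 2), ('SAE', 2), ('WPA2', 3), ('WPA', 4), ('OWE', 5),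
-- ]
--
-- def _normalize_security(security):
--     if not security:
--         return ''
--     s = str(security).strip()
--     if not s or s.lower() == 'nan':
--         return ''
--     up = s.upper()
--     best = 6
--     has_owe = False
--     has_wpa2 = False
--     for i in range(len(up)):
--         for tok, pr in _PRIORITY:
--             if up.startswith(tok, i):
--                 if pr < best:
--                     best = pr
--                 if tok == 'OWE':
--                     has_owe = True
--                 if tok == 'WPA2':
--                     has_wpa2 = True
--     if best == 0:
--         return 'OWE' if has_owe else 'OPEN'
--     if best == 1:
--         return 'WEP'
--     if best == 2:
--         return 'WPA2/WPA3' if has_wpa2 else 'WPA3'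
--     if best == 3:
--         return 'WPA2'
--     if best == 4:
--         return 'WPA1'
--     if best == 5:
--         return 'OWE'
--     return 'UNKNOWN'
-- ===== Notes on version B (the rewrite author's own statement) =====
-- stated objective: alternative
-- what changed: Replaces A's seven independent substring `in` scans with interleaved branching by a single left-to-right sweep over string positions that matches all tokens of a (token, priority) table at once, accumulating the minimum matched priority plus OWE/WPA2 flags; the category is then read off the accumulated minimum.
import Mathlib
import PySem

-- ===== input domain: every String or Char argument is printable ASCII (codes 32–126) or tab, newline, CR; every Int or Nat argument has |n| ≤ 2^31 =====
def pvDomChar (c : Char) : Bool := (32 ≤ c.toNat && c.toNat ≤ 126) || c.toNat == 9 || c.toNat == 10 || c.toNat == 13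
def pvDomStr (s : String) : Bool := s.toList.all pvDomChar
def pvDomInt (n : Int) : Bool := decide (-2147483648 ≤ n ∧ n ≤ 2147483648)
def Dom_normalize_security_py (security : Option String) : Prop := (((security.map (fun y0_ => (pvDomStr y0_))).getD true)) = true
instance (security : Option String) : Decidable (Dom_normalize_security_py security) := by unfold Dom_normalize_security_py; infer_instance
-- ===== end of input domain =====

-- ===== PORT A =====
-- B replaces A's seven separate substring `in` scans and interleaved branch ladder
-- with a single left-to-right sweep over string positions that accumulates the
-- minimum-priority token match plus two flags (objective: alternative).
def normalize_security_py (security : Option String) : String :=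
  match security with
  | none => ""
  | some sec =>
    if sec == "" then ""  -- `if not security`
    else
      let s := PySem.Str.strip sec
      if s == "" || PySem.Str.lower s == "nan" then ""
      else
        let up := PySem.Str.upper s
        if ["OPEN", "NONE", "UNSEC", "NO ENC", "NO_ENC", "NOENCRYPT"].any
            (fun tok => PySem.Str.isIn tok up) then
          if PySem.Str.isIn "OWE" up then "OWE" else "OPEN"
        else if PySem.Str.isIn "WEP" up then "WEP"
        else if ["WPA3", "SAE"].any (fun tok => PySem.Str.isIn tok up) then
          if PySem.Str.isIn "WPA2" up then "WPA2/WPA3" else "WPA3"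
        else if PySem.Str.isIn "WPA2" up then "WPA2"
        else if PySem.Str.isIn "WPA" up then "WPA1"
        else if PySem.Str.isIn "OWE" up then "OWE"
        else "UNKNOWN"

-- ===== PORT B =====
-- the (token, priority) table _PRIORITY of Source B
def nsPriority : List (String × Int) :=
  [("OPEN", 0), ("NONE", 0), ("UNSEC", 0), ("NO ENC", 0),
   ("NO_ENC", 0), ("NOENCRYPT", 0),
   ("WEP", 1), ("WPA3", 2), ("SAE", 2), ("WPA2", 3), ("WPA", 4), ("OWE", 5)]

-- inner loop of Source B: scan the token table at one position i
-- (`up.startswith(tok, i)` is `tok.toList.isPrefixOf (cs.drop i.toNat)` — exact for 0 ≤ i ≤ len)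
def nsScanAt (cs : List Char) (st : Int × Bool × Bool) (i : Int) : Int × Bool × Bool :=
  nsPriority.foldl
    (fun st p =>
      if p.1.toList.isPrefixOf (cs.drop i.toNat) then
        ((if p.2 < st.1 then p.2 else st.1),
         st.2.1 || (p.1 == "OWE"),
         st.2.2 || (p.1 == "WPA2"))
      else st) st

def normalize_security_py_alt (security : Option String) : String :=
  match security with
  | none => ""
  | some sec =>
    if sec == "" then ""
    else
      let s := PySem.Str.strip sec
      if s == "" || PySem.Str.lower s == "nan" then ""
      else
        let cs := (PySem.Str.upper s).toList
        -- single sweep: for i in range(len(up)): for tok, pr in _PRIORITY: …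
        let st := (PySem.List.pyRange 0 (cs.length : Int) 1).foldl (nsScanAt cs)
          ((6 : Int), false, false)
        if st.1 == 0 then (if st.2.1 then "OWE" else "OPEN")
        else if st.1 == 1 then "WEP"
        else if st.1 == 2 then (if st.2.2 then "WPA2/WPA3" else "WPA3")
        else if st.1 == 3 then "WPA2"
        else if st.1 == 4 then "WPA1"
        else if st.1 == 5 then "OWE"
        else "UNKNOWN"

-- ===== PRECONDITION & SPEC =====
def Spec_normalize_security_py (security : Option String) (out : String) : Prop := out = normalize_security_py_alt security
instance (security : Option String) (out : String) : Decidable (Spec_normalize_security_py security out) := by unfold Spec_normalize_security_py; infer_instance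

-- ===== CLAIM =====
def Claim_equal_normalize_security_py : Prop := ∀ (security : Option String), Dom_normalize_security_py security → Spec_normalize_security_py security (normalize_security_py security)

-- ===== LEMMAS AND PROOFS =====

-- proof-side components of the sweep state
def nsB (cs : List Char) (b : Int) (i : Int) : Int :=
  nsPriority.foldl
    (fun b p => if p.1.toList.isPrefixOf (cs.drop i.toNat) then (if p.2 < b then p.2 else b) else b) b

def nsF (cs : List Char) (t : String) (o : Bool) (i : Int) : Bool :=
  o || t.toList.isPrefixOf (cs.drop i.toNat)

-- one scan step splits into its three components
lemma scan_split_gen (cs : List Char) (i : Int) :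
    ∀ (l : List (String × Int)) (st : Int × Bool × Bool),
      l.foldl
        (fun st p =>
          if p.1.toList.isPrefixOf (cs.drop i.toNat) then
            ((if p.2 < st.1 then p.2 else st.1),
             st.2.1 || (p.1 == "OWE"),
             st.2.2 || (p.1 == "WPA2"))
          else st) st
      = (l.foldl (fun b p => if p.1.toList.isPrefixOf (cs.drop i.toNat) then (if p.2 < b then p.2 else b) else b) st.1,
         st.2.1 || (l.any fun p => p.1.toList.isPrefixOf (cs.drop i.toNat) && (p.1 == "OWE")),
         st.2.2 || (l.any fun p => p.1.toList.isPrefixOf (cs.drop i.toNat) && (p.1 == "WPA2"))) := by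
  intro l
  induction l with
  | nil => intro st; simp
  | cons p l ih =>
    intro st
    by_cases h : p.1.toList.isPrefixOf (cs.drop i.toNat) = true
    · simp only [List.foldl_cons, List.any_cons, h, if_true, Bool.true_and,
        ih, Bool.or_assoc]
    · simp only [Bool.not_eq_true] at h
      simp only [List.foldl_cons, List.any_cons, h, Bool.false_eq_true, if_false,
        Bool.false_and, Bool.false_or, ih]

lemma scan_split (cs : List Char) (st : Int × Bool × Bool) (i : Int) :
    nsScanAt cs st i = (nsB cs st.1 i, nsF cs "OWE" st.2.1 i, nsF cs "WPA2" st.2.2 i) := by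
  unfold nsScanAt nsB nsF
  rw [scan_split_gen]
  refine congrArg₂ _ rfl (congrArg₂ _ ?_ ?_) <;>
    · refine congrArg₂ _ rfl ?_
      simp [nsPriority]

lemma fold_split (cs : List Char) :
    ∀ (l : List Int) (st : Int × Bool × Bool),
      l.foldl (nsScanAt cs) st
        = (l.foldl (nsB cs) st.1, l.foldl (nsF cs "OWE") st.2.1, l.foldl (nsF cs "WPA2") st.2.2) := by
  intro l
  induction l with
  | nil => intro st; rfl
  | cons i l ih => intro st; rw [List.foldl_cons, scan_split, ih]; rfl

lemma fold_flag (cs : List Char) (t : String) :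
    ∀ (l : List Int) (o : Bool),
      l.foldl (nsF cs t) o = (o || l.any (fun i => t.toList.isPrefixOf (cs.drop i.toNat))) := by
  intro l
  induction l with
  | nil => intro o; simp
  | cons i l ih => intro o; simp [nsF, ih, Bool.or_assoc]

-- the sweep sees a token iff it is a substring
lemma any_pre_iff (t : String) (h : t.toList ≠ []) (up : String) :
    ((PySem.List.pyRange 0 (up.toList.length : Int) 1).any
        (fun i => t.toList.isPrefixOf (up.toList.drop i.toNat)))
      = PySem.Str.isIn t up := by
  rw [Bool.eq_iff_iff, List.any_eq_true, PySem.Str.isIn_iff_infix]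
  rw [← PySem.Chars.isIn_iff_infix, ← PySem.Chars.exists_prefix_drop_iff_isIn]
  constructor
  · rintro ⟨i, hi, hp⟩
    exact ⟨i.toNat, List.isPrefixOf_iff_prefix.mp hp⟩
  · rintro ⟨j, hj⟩
    by_cases hlen : j < up.toList.length
    · refine ⟨(j : Int), ?_, ?_⟩
      · rw [PySem.List.mem_pyRange_one]; omega
      · rw [Int.toNat_natCast]; exact List.isPrefixOf_iff_prefix.mpr hj
    · exfalso
      rw [List.drop_eq_nil_of_le (by omega)] at hj
      exact h (List.prefix_nil.mp hj)

-- bound lemmas for the min-priority fold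
lemma nsB_le_init_gen (cs : List Char) (i : Int) :
    ∀ (l : List (String × Int)) (b : Int),
      l.foldl (fun b p => if p.1.toList.isPrefixOf (cs.drop i.toNat) then (if p.2 < b then p.2 else b) else b) b ≤ b := by
  intro l
  induction l with
  | nil => intro b; simp
  | cons p l ih =>
    intro b
    refine le_trans (ih _) ?_
    dsimp only
    split_ifs <;> omega

lemma nsB_le_init (cs : List Char) (b : Int) (i : Int) : nsB cs b i ≤ b :=
  nsB_le_init_gen cs i nsPriority b

lemma foldl_nsB_le_init (cs : List Char) :
    ∀ (l : List Int) (b : Int), l.foldl (nsB cs) b ≤ b := by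
  intro l
  induction l with
  | nil => intro b; simp
  | cons i l ih => intro b; exact le_trans (ih _) (nsB_le_init cs b i)

lemma nsB_le_matched (cs : List Char) (i : Int) {p : String × Int} (hp : p ∈ nsPriority)
    (hpre : p.1.toList.isPrefixOf (cs.drop i.toNat) = true) (b : Int) : nsB cs b i ≤ p.2 := by
  unfold nsB
  obtain ⟨l1, l2, hsplit⟩ := List.append_of_mem hp
  rw [hsplit]
  rw [List.foldl_append, List.foldl_cons, hpre]
  simp only [if_true]
  refine le_trans (nsB_le_init_gen cs i l2 _) ?_
  split_ifs <;> omega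

lemma foldl_nsB_le_matched (cs : List Char) {l : List Int} {i : Int} (hi : i ∈ l)
    {p : String × Int} (hp : p ∈ nsPriority)
    (hpre : p.1.toList.isPrefixOf (cs.drop i.toNat) = true) (b : Int) :
    l.foldl (nsB cs) b ≤ p.2 := by
  obtain ⟨l1, l2, rfl⟩ := List.append_of_mem hi
  rw [List.foldl_append, List.foldl_cons]
  exact le_trans (foldl_nsB_le_init cs l2 _) (nsB_le_matched cs i hp hpre _)

lemma nsB_lb_gen (cs : List Char) (i : Int) (k : Int) :
    ∀ (l : List (String × Int)) (b : Int), k ≤ b →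
      (∀ p ∈ l, p.1.toList.isPrefixOf (cs.drop i.toNat) = true → k ≤ p.2) →
      k ≤ l.foldl (fun b p => if p.1.toList.isPrefixOf (cs.drop i.toNat) then (if p.2 < b then p.2 else b) else b) b := by
  intro l
  induction l with
  | nil => intro b hb _; simpa using hb
  | cons p l ih =>
    intro b hb hall
    refine ih _ ?_ (fun q hq => hall q (List.mem_cons_of_mem _ hq))
    have := hall p (List.mem_cons_self ..)
    dsimp only
    split_ifs with h1 h2
    · exact this h1
    · exact hb
    · exact hb

lemma foldl_nsB_lb (cs : List Char) (k : Int) :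
    ∀ (l : List Int) (b : Int), k ≤ b →
      (∀ i ∈ l, ∀ p ∈ nsPriority, p.1.toList.isPrefixOf (cs.drop i.toNat) = true → k ≤ p.2) →
      k ≤ l.foldl (nsB cs) b := by
  intro l
  induction l with
  | nil => intro b hb _; simpa using hb
  | cons i l ih =>
    intro b hb hall
    refine ih _ ?_ (fun j hj => hall j (List.mem_cons_of_mem _ hj))
    exact nsB_lb_gen cs i k nsPriority b hb (hall i (List.mem_cons_self ..))

lemma nsB_cases_gen (cs : List Char) (i : Int) :
    ∀ (l : List (String × Int)) (b : Int),
      (l.foldl (fun b p => if p.1.toList.isPrefixOf (cs.drop i.toNat) then (if p.2 < b then p.2 else b) else b) b = b)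
      ∨ ∃ p ∈ l, p.1.toList.isPrefixOf (cs.drop i.toNat) = true ∧
          l.foldl (fun b p => if p.1.toList.isPrefixOf (cs.drop i.toNat) then (if p.2 < b then p.2 else b) else b) b = p.2 := by
  intro l
  induction l with
  | nil => intro b; left; rfl
  | cons p l ih =>
    intro b
    rw [List.foldl_cons]
    rcases ih (if p.1.toList.isPrefixOf (cs.drop i.toNat) then (if p.2 < b then p.2 else b) else b) with h | ⟨q, hq, hpre, h⟩
    · rw [h]
      split_ifs with h1 h2
      · exact Or.inr ⟨p, List.mem_cons_self .., h1, rfl⟩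
      · exact Or.inl rfl
      · exact Or.inl rfl
    · exact Or.inr ⟨q, List.mem_cons_of_mem _ hq, hpre, h⟩

lemma foldl_nsB_cases (cs : List Char) :
    ∀ (l : List Int) (b : Int),
      (l.foldl (nsB cs) b = b)
      ∨ ∃ i ∈ l, ∃ p ∈ nsPriority, p.1.toList.isPrefixOf (cs.drop i.toNat) = true ∧
          l.foldl (nsB cs) b = p.2 := by
  intro l
  induction l with
  | nil => intro b; left; rfl
  | cons i l ih =>
    intro b
    rw [List.foldl_cons]
    rcases ih (nsB cs b i) with h | ⟨j, hj, p, hp, hpre, h⟩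
    · rw [h]
      rcases nsB_cases_gen cs i nsPriority b with h2 | ⟨p, hp, hpre, h2⟩
      · exact Or.inl h2
      · exact Or.inr ⟨i, List.mem_cons_self .., p, hp, hpre, h2⟩
    · exact Or.inr ⟨j, List.mem_cons_of_mem _ hj, p, hp, hpre, h⟩

-- the core equality, for any uppercased string
lemma ns_core_eq (up : String) :
    (if ["OPEN", "NONE", "UNSEC", "NO ENC", "NO_ENC", "NOENCRYPT"].any
        (fun tok => PySem.Str.isIn tok up) then
      if PySem.Str.isIn "OWE" up then "OWE" else "OPEN"
    else if PySem.Str.isIn "WEP" up then "WEP"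
    else if ["WPA3", "SAE"].any (fun tok => PySem.Str.isIn tok up) then
      if PySem.Str.isIn "WPA2" up then "WPA2/WPA3" else "WPA3"
    else if PySem.Str.isIn "WPA2" up then "WPA2"
    else if PySem.Str.isIn "WPA" up then "WPA1"
    else if PySem.Str.isIn "OWE" up then "OWE"
    else ("UNKNOWN" : String)) =
    (let cs := up.toList
     let st := (PySem.List.pyRange 0 (cs.length : Int) 1).foldl (nsScanAt cs)
       ((6 : Int), false, false)
     if st.1 == 0 then (if st.2.1 then "OWE" else "OPEN")
     else if st.1 == 1 then "WEP"
     else if st.1 == 2 then (if st.2.2 then "WPA2/WPA3" else "WPA3")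
     else if st.1 == 3 then "WPA2"
     else if st.1 == 4 then "WPA1"
     else if st.1 == 5 then "OWE"
     else "UNKNOWN") := by
  have hne : ∀ p ∈ nsPriority, p.1.toList ≠ [] := by
    intro p hp; fin_cases hp <;> decide
  have hm : ∀ p ∈ nsPriority, ∀ i ∈ PySem.List.pyRange 0 (up.toList.length : Int) 1,
      p.1.toList.isPrefixOf (up.toList.drop i.toNat) = true → PySem.Str.isIn p.1 up = true := by
    intro p hp i hi hpre
    rw [← any_pre_iff p.1 (hne p hp) up]
    exact List.any_eq_true.mpr ⟨i, hi, hpre⟩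
  have hex : ∀ (t : String), t.toList ≠ [] → PySem.Str.isIn t up = true →
      ∃ i ∈ PySem.List.pyRange 0 (up.toList.length : Int) 1,
        t.toList.isPrefixOf (up.toList.drop i.toNat) = true := by
    intro t ht hIn
    rw [← any_pre_iff t ht up] at hIn
    exact List.any_eq_true.mp hIn
  have hub : ∀ (t : String) (pr : Int), (t, pr) ∈ nsPriority → PySem.Str.isIn t up = true →
      (PySem.List.pyRange 0 (up.toList.length : Int) 1).foldl (nsB up.toList) 6 ≤ pr := by
    intro t pr hp hIn
    obtain ⟨i, hi, hpre⟩ := hex t (hne _ hp) hIn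
    exact foldl_nsB_le_matched up.toList hi hp hpre 6
  have hfold : (PySem.List.pyRange 0 (up.toList.length : Int) 1).foldl (nsScanAt up.toList)
      ((6 : Int), false, false)
      = ((PySem.List.pyRange 0 (up.toList.length : Int) 1).foldl (nsB up.toList) 6,
         PySem.Str.isIn "OWE" up, PySem.Str.isIn "WPA2" up) := by
    rw [fold_split, fold_flag, fold_flag, Bool.false_or, Bool.false_or,
      any_pre_iff "OWE" (by decide) up, any_pre_iff "WPA2" (by decide) up]
  simp only [hfold]
  by_cases hO : (["OPEN", "NONE", "UNSEC", "NO ENC", "NO_ENC", "NOENCRYPT"].any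
      (fun tok => PySem.Str.isIn tok up)) = true
  · -- some open token present: the sweep's minimum is 0
    have hle : (PySem.List.pyRange 0 (up.toList.length : Int) 1).foldl (nsB up.toList) 6 ≤ 0 := by
      rcases List.any_eq_true.mp hO with ⟨t, ht, hIn⟩
      fin_cases ht
      · exact hub "OPEN" 0 (by simp [nsPriority]) hIn
      · exact hub "NONE" 0 (by simp [nsPriority]) hIn
      · exact hub "UNSEC" 0 (by simp [nsPriority]) hIn
      · exact hub "NO ENC" 0 (by simp [nsPriority]) hIn
      · exact hub "NO_ENC" 0 (by simp [nsPriority]) hIn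
      · exact hub "NOENCRYPT" 0 (by simp [nsPriority]) hIn
    have hge : (0 : Int) ≤ (PySem.List.pyRange 0 (up.toList.length : Int) 1).foldl (nsB up.toList) 6 := by
      refine foldl_nsB_lb up.toList 0 _ 6 (by omega) ?_
      intro i hi p hp hpre
      fin_cases hp <;> decide
    have hb : (PySem.List.pyRange 0 (up.toList.length : Int) 1).foldl (nsB up.toList) 6 = 0 := le_antisymm hle hge
    have e0 : (((0 : Int)) == 0) = true := by decide
    simp only [hO, hb, e0, if_true]
  · simp only [Bool.not_eq_true] at hO
    have hOe := List.any_eq_false.mp hO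
    by_cases hWEP : PySem.Str.isIn "WEP" up = true
    · have hle := hub "WEP" 1 (by simp [nsPriority]) hWEP
      have hge : (1 : Int) ≤ (PySem.List.pyRange 0 (up.toList.length : Int) 1).foldl (nsB up.toList) 6 := by
        refine foldl_nsB_lb up.toList 1 _ 6 (by omega) ?_
        intro i hi p hp hpre
        have hIn := hm p hp i hi hpre
        fin_cases hp <;>
          first
            | decide
            | exact absurd hIn (hOe _ (by decide))
      have hb : (PySem.List.pyRange 0 (up.toList.length : Int) 1).foldl (nsB up.toList) 6 = 1 := le_antisymm hle hge
      have e0 : (((1 : Int)) == 0) = false := by decide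
      have e1 : (((1 : Int)) == 1) = true := by decide
      simp only [hO, hWEP, hb, e0, e1, Bool.false_eq_true, if_true, if_false]
    · simp only [Bool.not_eq_true] at hWEP
      by_cases hW3 : (["WPA3", "SAE"].any (fun tok => PySem.Str.isIn tok up)) = true
      · have hle : (PySem.List.pyRange 0 (up.toList.length : Int) 1).foldl (nsB up.toList) 6 ≤ 2 := by
          rcases List.any_eq_true.mp hW3 with ⟨t, ht, hIn⟩
          fin_cases ht
          · exact hub "WPA3" 2 (by simp [nsPriority]) hIn
          · exact hub "SAE" 2 (by simp [nsPriority]) hIn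
        have hge : (2 : Int) ≤ (PySem.List.pyRange 0 (up.toList.length : Int) 1).foldl (nsB up.toList) 6 := by
          refine foldl_nsB_lb up.toList 2 _ 6 (by omega) ?_
          intro i hi p hp hpre
          have hIn := hm p hp i hi hpre
          fin_cases hp <;>
            first
              | decide
              | exact absurd hIn (hOe _ (by decide))
              | exact absurd hIn (by simpa using hWEP)
        have hb : (PySem.List.pyRange 0 (up.toList.length : Int) 1).foldl (nsB up.toList) 6 = 2 := le_antisymm hle hge
        have e0 : (((2 : Int)) == 0) = false := by decide
        have e1 : (((2 : Int)) == 1) = false := by decide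
        have e2 : (((2 : Int)) == 2) = true := by decide
        simp only [hO, hWEP, hW3, hb, e0, e1, e2, Bool.false_eq_true, if_true, if_false]
      · simp only [Bool.not_eq_true] at hW3
        have hW3e := List.any_eq_false.mp hW3
        by_cases hW2 : PySem.Str.isIn "WPA2" up = true
        · have hle := hub "WPA2" 3 (by simp [nsPriority]) hW2
          have hge : (3 : Int) ≤ (PySem.List.pyRange 0 (up.toList.length : Int) 1).foldl (nsB up.toList) 6 := by
            refine foldl_nsB_lb up.toList 3 _ 6 (by omega) ?_
            intro i hi p hp hpre
            have hIn := hm p hp i hi hpre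
            fin_cases hp <;>
              first
                | decide
                | exact absurd hIn (hOe _ (by decide))
                | exact absurd hIn (by simpa using hWEP)
                | exact absurd hIn (hW3e _ (by decide))
          have hb : (PySem.List.pyRange 0 (up.toList.length : Int) 1).foldl (nsB up.toList) 6 = 3 := le_antisymm hle hge
          have e0 : (((3 : Int)) == 0) = false := by decide
          have e1 : (((3 : Int)) == 1) = false := by decide
          have e2 : (((3 : Int)) == 2) = false := by decide
          have e3 : (((3 : Int)) == 3) = true := by decide
          simp only [hO, hWEP, hW3, hW2, hb, e0, e1, e2, e3, Bool.false_eq_true, if_true, if_false]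
        · simp only [Bool.not_eq_true] at hW2
          by_cases hW : PySem.Str.isIn "WPA" up = true
          · have hle := hub "WPA" 4 (by simp [nsPriority]) hW
            have hge : (4 : Int) ≤ (PySem.List.pyRange 0 (up.toList.length : Int) 1).foldl (nsB up.toList) 6 := by
              refine foldl_nsB_lb up.toList 4 _ 6 (by omega) ?_
              intro i hi p hp hpre
              have hIn := hm p hp i hi hpre
              fin_cases hp <;>
                first
                  | decide
                  | exact absurd hIn (hOe _ (by decide))
                  | exact absurd hIn (by simpa using hWEP)
                  | exact absurd hIn (hW3e _ (by decide))
                  | exact absurd hIn (by simpa using hW2)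
            have hb : (PySem.List.pyRange 0 (up.toList.length : Int) 1).foldl (nsB up.toList) 6 = 4 := le_antisymm hle hge
            have e0 : (((4 : Int)) == 0) = false := by decide
            have e1 : (((4 : Int)) == 1) = false := by decide
            have e2 : (((4 : Int)) == 2) = false := by decide
            have e3 : (((4 : Int)) == 3) = false := by decide
            have e4 : (((4 : Int)) == 4) = true := by decide
            simp only [hO, hWEP, hW3, hW2, hW, hb, e0, e1, e2, e3, e4, Bool.false_eq_true, if_true, if_false]
          · simp only [Bool.not_eq_true] at hW
            by_cases hOWE : PySem.Str.isIn "OWE" up = true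
            · have hle := hub "OWE" 5 (by simp [nsPriority]) hOWE
              have hge : (5 : Int) ≤ (PySem.List.pyRange 0 (up.toList.length : Int) 1).foldl (nsB up.toList) 6 := by
                refine foldl_nsB_lb up.toList 5 _ 6 (by omega) ?_
                intro i hi p hp hpre
                have hIn := hm p hp i hi hpre
                fin_cases hp <;>
                  first
                    | decide
                    | exact absurd hIn (hOe _ (by decide))
                    | exact absurd hIn (by simpa using hWEP)
                    | exact absurd hIn (hW3e _ (by decide))
                    | exact absurd hIn (by simpa using hW2)
                    | exact absurd hIn (by simpa using hW)
              have hb : (PySem.List.pyRange 0 (up.toList.length : Int) 1).foldl (nsB up.toList) 6 = 5 := le_antisymm hle hge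
              have e0 : (((5 : Int)) == 0) = false := by decide
              have e1 : (((5 : Int)) == 1) = false := by decide
              have e2 : (((5 : Int)) == 2) = false := by decide
              have e3 : (((5 : Int)) == 3) = false := by decide
              have e4 : (((5 : Int)) == 4) = false := by decide
              have e5 : (((5 : Int)) == 5) = true := by decide
              simp only [hO, hWEP, hW3, hW2, hW, hOWE, hb, e0, e1, e2, e3, e4, e5, Bool.false_eq_true, if_true, if_false]
            · simp only [Bool.not_eq_true] at hOWE
              have hb : (PySem.List.pyRange 0 (up.toList.length : Int) 1).foldl (nsB up.toList) 6 = 6 := by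
                rcases foldl_nsB_cases up.toList (PySem.List.pyRange 0 (up.toList.length : Int) 1) 6 with
                  h | ⟨i, hi, p, hp, hpre, h⟩
                · exact h
                · exfalso
                  have hIn := hm p hp i hi hpre
                  fin_cases hp <;>
                    first
                      | exact absurd hIn (hOe _ (by decide))
                      | exact absurd hIn (by simpa using hWEP)
                      | exact absurd hIn (hW3e _ (by decide))
                      | exact absurd hIn (by simpa using hW2)
                      | exact absurd hIn (by simpa using hW)
                      | exact absurd hIn (by simpa using hOWE)
              have e0 : (((6 : Int)) == 0) = false := by decide
              have e1 : (((6 : Int)) == 1) = false := by decide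
              have e2 : (((6 : Int)) == 2) = false := by decide
              have e3 : (((6 : Int)) == 3) = false := by decide
              have e4 : (((6 : Int)) == 4) = false := by decide
              have e5 : (((6 : Int)) == 5) = false := by decide
              simp only [hO, hWEP, hW3, hW2, hW, hOWE, hb, e0, e1, e2, e3, e4, e5, Bool.false_eq_true, if_false]

-- ===== VERDICT =====
theorem normalize_security_py_spec : Claim_equal_normalize_security_py := by
  intro security _
  unfold Spec_normalize_security_py normalize_security_py normalize_security_py_alt
  cases security with
  | none => rfl
  | some sec =>
    by_cases hsec : sec == "" <;> simp only [hsec, if_true, if_false, Bool.false_eq_true]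
    by_cases hs : (PySem.Str.strip sec == "" || PySem.Str.lower (PySem.Str.strip sec) == "nan") = true <;>
      simp only [hs, if_true, if_false, Bool.false_eq_true]
    exact ns_core_eq _
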